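-- pv_equiv track=rewrite | github.com/abertsch72/unlimiformer | src/test_window_indices.py | window_indices
-- ===== SOURCE A (Python) =====
-- def window_indices(total_seq_len, model_encoder_max_len):
--     # Copied from SLED (Ivgy et al., 2022)
--     # https://github.com/Mivg/SLED/blob/main/sled/modeling_sled.py#L467
--     if total_seq_len <= model_encoder_max_len:
--         return [(0, total_seq_len, 0, total_seq_len)]
--     else:
--         results = []
--         # if self.chunk_overlap == 0:
--         #     stride = self.model_encoder_max_len
--         window_margin = int(model_encoder_max_len * 0.5 / 2)
--         stride = model_encoder_max_len - 2 * window_margin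
--         context_start = update_start_ind = 0
--         context_end = model_encoder_max_len
--
--         update_end_ind = context_end
--
--         # first window always should update from the beginning
--         results.append((context_start, context_end, update_start_ind, update_end_ind))
--
--         while context_end < total_seq_len:
--             context_end = min(total_seq_len, context_end + stride)
--             context_start = (
--                 context_start + stride if context_end < total_seq_len else total_seq_len - model_encoder_max_len
--             )
--             update_start_ind = max(update_start_ind + stride, update_end_ind)
--             # last window always should update until the end
--             update_end_ind = (
--                 min(total_seq_len, update_end_ind + stride) if context_end < total_seq_len else total_seq_len
--             )
--
--             cs, ce, us, ue = context_start, context_end, update_start_ind - context_start, \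
--                                 update_end_ind - context_start
--
--             results.append((cs, ce, us, ue))
--         return results
-- ===== SOURCE B (Python) =====
-- def window_indices(total_seq_len, model_encoder_max_len):
--     # Closed-form construction: one first window, interior windows by direct
--     # formula over k, and one clamped last window; no running loop state.
--     T, M = total_seq_len, model_encoder_max_len
--     if T <= M:
--         return [(0, T, 0, T)]
--     s = M - 2 * (M // 4)  # stride
--     n = (T - M - 1) // s  # number of interior windows (k with M + k*s < T)
--     return ([(0, M, 0, M)]
--             + [(k * s, M + k * s, M - s, M) for k in range(1, n + 1)]
--             + [(T - M, T, M + n * s - (T - M), M)])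
-- ===== Notes on version B (the rewrite author's own statement) =====
-- stated objective: alternative
-- what changed: Replaces the running-state while-loop (context/update indices updated with min/max clamping each step) with a closed-form construction: the interior windows are generated by a direct formula over k=1..n with n computed by one floor division, plus an explicitly clamped last window.
import Mathlib
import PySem

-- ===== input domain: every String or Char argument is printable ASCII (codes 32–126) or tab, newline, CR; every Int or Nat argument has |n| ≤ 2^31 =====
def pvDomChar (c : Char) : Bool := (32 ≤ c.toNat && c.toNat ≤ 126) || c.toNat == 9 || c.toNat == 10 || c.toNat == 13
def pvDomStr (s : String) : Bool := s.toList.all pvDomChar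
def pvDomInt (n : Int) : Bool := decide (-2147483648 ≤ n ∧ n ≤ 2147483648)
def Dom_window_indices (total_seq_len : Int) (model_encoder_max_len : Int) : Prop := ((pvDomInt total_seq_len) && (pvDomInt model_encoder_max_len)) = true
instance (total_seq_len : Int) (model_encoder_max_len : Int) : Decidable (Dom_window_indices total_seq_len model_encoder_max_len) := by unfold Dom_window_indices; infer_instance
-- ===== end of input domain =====

-- B replaces A's running-state while-loop by a closed-form per-index construction
-- of the interior windows plus an explicit clamped last window (alternative decomposition).


-- ===== PORT A =====
-- A's while-loop; fuel only makes the recursion total (under Pre_ the fuel never runs out).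
def winLoopA (total_seq_len model_encoder_max_len stride : Int) :
    Nat → Int → Int → Int → Int → List (Int × Int × Int × Int) → List (Int × Int × Int × Int)
  | 0, _, _, _, _, results => results
  | fuel + 1, context_start, context_end, update_start_ind, update_end_ind, results =>
    if context_end < total_seq_len then
      let context_end' := min total_seq_len (context_end + stride)
      let context_start' :=
        if context_end' < total_seq_len then context_start + stride
        else total_seq_len - model_encoder_max_len
      let update_start_ind' := max (update_start_ind + stride) update_end_ind
      let update_end_ind' :=
        if context_end' < total_seq_len then min total_seq_len (update_end_ind + stride)
        else total_seq_len
      winLoopA total_seq_len model_encoder_max_len stride fuel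
        context_start' context_end' update_start_ind' update_end_ind'
        (results ++ [(context_start', context_end', update_start_ind' - context_start',
                      update_end_ind' - context_start')])
    else results

def window_indices (total_seq_len : Int) (model_encoder_max_len : Int) : List (Int × Int × Int × Int) :=
  if total_seq_len ≤ model_encoder_max_len then [(0, total_seq_len, 0, total_seq_len)]
  else
    -- int(model_encoder_max_len * 0.5 / 2) = truncating division by 4; exact for |M| ≤ 2^31
    let window_margin := Int.tdiv model_encoder_max_len 4
    let stride := model_encoder_max_len - 2 * window_margin
    winLoopA total_seq_len model_encoder_max_len stride
      ((total_seq_len - model_encoder_max_len).toNat + 1)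
      0 model_encoder_max_len 0 model_encoder_max_len
      [(0, model_encoder_max_len, 0, model_encoder_max_len)]

-- ===== PORT B =====
def window_indices_alt (total_seq_len : Int) (model_encoder_max_len : Int) : List (Int × Int × Int × Int) :=
  if total_seq_len ≤ model_encoder_max_len then [(0, total_seq_len, 0, total_seq_len)]
  else
    let M := model_encoder_max_len
    let T := total_seq_len
    let s := M - 2 * PySem.Int.floordiv M 4
    let n := PySem.Int.floordiv (T - M - 1) s
    [(0, M, 0, M)]
      ++ (PySem.List.pyRange 1 (n + 1) 1).map (fun k => (k * s, M + k * s, M - s, M))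
      ++ [(T - M, T, M + n * s - (T - M), M)]

-- ===== PRECONDITION & SPEC =====
-- Pre_ excludes only the inputs on which A never returns: when total_seq_len >
-- model_encoder_max_len and model_encoder_max_len ≤ 0 the stride is ≤ 0 and A's
-- while-loop diverges (infinite loop).
def Pre_window_indices (total_seq_len : Int) (model_encoder_max_len : Int) : Prop :=
  total_seq_len ≤ model_encoder_max_len ∨ 1 ≤ model_encoder_max_len
instance (total_seq_len : Int) (model_encoder_max_len : Int) : Decidable (Pre_window_indices total_seq_len model_encoder_max_len) := by unfold Pre_window_indices; infer_instance

def pvWitness_window_indices : Int × Int := (25, 8)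

def Spec_window_indices (total_seq_len : Int) (model_encoder_max_len : Int) (out : List (Int × Int × Int × Int)) : Prop := out = window_indices_alt total_seq_len model_encoder_max_len
instance (total_seq_len : Int) (model_encoder_max_len : Int) (out : List (Int × Int × Int × Int)) : Decidable (Spec_window_indices total_seq_len model_encoder_max_len out) := by unfold Spec_window_indices; infer_instance

-- ===== CLAIM (what is proved, stated in full; the proofs are below) =====
def Claim_equal_window_indices : Prop := ∀ (total_seq_len : Int) (model_encoder_max_len : Int), Dom_window_indices total_seq_len model_encoder_max_len → Pre_window_indices total_seq_len model_encoder_max_len → Spec_window_indices total_seq_len model_encoder_max_len (window_indices total_seq_len model_encoder_max_len)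

-- ===== LEMMAS AND PROOFS =====

-- The loop returns the accumulator immediately once context_end has reached total_seq_len.
theorem winLoopA_exit (T M s : Int) (fuel : Nat) (cs ce us ue : Int)
    (acc : List (Int × Int × Int × Int)) (h : ¬ ce < T) :
    winLoopA T M s fuel cs ce us ue acc = acc := by
  cases fuel with
  | zero => rfl
  | succ f => rw [winLoopA]; simp [h]

-- Loop invariant: after k interior steps the state is
-- (k*s, M+k*s, us, M+k*s) with us + s ≤ M + k*s, and M + k*s < T.
theorem winLoopA_inv (T M s : Int) (hs : 1 ≤ s) :
    ∀ (fuel : Nat) (k us : Int) (acc : List (Int × Int × Int × Int)),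
      (T - (M + k * s)).toNat + 1 ≤ fuel →
      us + s ≤ M + k * s →
      M + k * s < T →
      0 ≤ k →
      winLoopA T M s fuel (k * s) (M + k * s) us (M + k * s) acc =
        acc
          ++ (PySem.List.pyRange (k + 1) (PySem.Int.floordiv (T - M - 1) s + 1) 1).map
              (fun j => (j * s, M + j * s, M - s, M))
          ++ [(T - M, T, M + (PySem.Int.floordiv (T - M - 1) s) * s - (T - M), M)] := by
  intro fuel
  induction fuel with
  | zero => intro k us acc hfuel hus hlt hk; omega
  | succ fuel ih =>
    intro k us acc hfuel hus hlt hk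
    have hspos : 0 < s := hs
    set n := PySem.Int.floordiv (T - M - 1) s with hn_def
    have hchar : n * s ≤ T - M - 1 ∧ T - M - 1 < (n + 1) * s :=
      (PySem.Int.floordiv_eq_iff_of_pos (a := T - M - 1) (b := s) (q := n) hspos).mp rfl
    have harg : (k * s + s) = (k + 1) * s := by ring
    have hkn : k ≤ n := by
      by_contra h
      have : (n + 1) * s ≤ k * s :=
        mul_le_mul_of_nonneg_right (by omega) (le_of_lt hspos)
      omega
    rw [winLoopA]
    simp only [if_pos hlt]
    by_cases hmid : min T (M + k * s + s) < T
    · -- interior step: M + (k+1)*s < T, so k + 1 ≤ n, range is nonempty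
      have hlt' : M + (k + 1) * s < T := by omega
      have hmin : min T (M + k * s + s) = M + k * s + s := by omega
      have hmax : max (us + s) (M + k * s) = M + k * s := by omega
      have hk1n : k + 1 ≤ n := by
        by_contra h
        have hkn' : k = n := by omega
        have : (n + 1) * s ≤ (k + 1) * s :=
          mul_le_mul_of_nonneg_right (by omega) (le_of_lt hspos)
        omega
      have hrec := ih (k + 1) (M + k * s)
        (acc ++ [((k + 1) * s, M + (k + 1) * s, M - s, M)])
        (by omega) (by omega) hlt' (by omega)
      simp only [hmin, if_pos (by omega : M + k * s + s < T), hmax]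
      rw [show M + k * s - (k * s + s) = M - s from by ring,
          show M + k * s + s - (k * s + s) = M from by ring,
          harg, show M + k * s + s = M + (k + 1) * s from by ring]
      rw [hrec]
      rw [PySem.List.pyRange_one_cons (by omega : (k : Int) + 1 < n + 1)]
      simp [List.append_assoc]
    · -- last step: k = n, the context end is clamped to T
      have hmin : min T (M + k * s + s) = T := by omega
      have hken : k = n := by
        by_contra h
        have hk1n : k + 1 ≤ n := by omega
        have : (k + 1) * s ≤ n * s :=
          mul_le_mul_of_nonneg_right (by omega) (le_of_lt hspos)
        omega
      have husmax : max (us + s) (M + k * s) = M + k * s := by omega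
      simp only [hmin, if_neg (by omega : ¬ (T < T)), husmax]
      rw [winLoopA_exit T M s fuel _ _ _ _ _ (by omega : ¬ (T < T))]
      rw [hken, PySem.List.pyRange_one_eq_nil (by omega : (n : Int) + 1 ≤ n + 1)]
      simp

theorem tdiv_eq_floordiv_of_nonneg (M : Int) (h : 0 ≤ M) :
    Int.tdiv M 4 = PySem.Int.floordiv M 4 := by
  rw [PySem.Int.floordiv_eq_ediv_of_pos (by omega : (0:Int) < 4)]
  exact Int.tdiv_eq_ediv_of_nonneg h

-- ===== VERDICT (by name: the statement is the Claim_ definition above) =====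
theorem window_indices_spec : Claim_equal_window_indices := by
  intro T M _ hpre
  unfold Spec_window_indices window_indices window_indices_alt
  by_cases h : T ≤ M
  · simp [h]
  · simp only [if_neg h]
    have hM : 1 ≤ M := by
      rcases hpre with h' | h'
      · omega
      · exact h'
    rw [tdiv_eq_floordiv_of_nonneg M (by omega)]
    set s := M - 2 * PySem.Int.floordiv M 4 with hs_def
    have hflo : PySem.Int.floordiv M 4 * 4 ≤ M ∧ M < (PySem.Int.floordiv M 4 + 1) * 4 :=
      (PySem.Int.floordiv_eq_iff_of_pos (by omega)).mp rfl
    have hs1 : 1 ≤ s := by omega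
    have hsM : s ≤ M := by omega
    have := winLoopA_inv T M s hs1 ((T - M).toNat + 1) 0 0
      [(0, M, 0, M)] (by simp) (by omega) (by omega) (le_refl 0)
    simp only [zero_mul, add_zero, zero_add] at this ⊢
    rw [this]
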